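-- pv_equiv track=rewrite | github.com/rogue-socket/mycompagent | browser_agent/tool_definitions.py | tool_call_to_cli
-- ===== SOURCE A (Python) =====
-- import shlex
--
-- _CLI_NAME_MAP: dict[str, str] = {
--     "go_back": "go-back",
--     "go_forward": "go-forward",
--     "tab_list": "tab-list",
--     "tab_new": "tab-new",
--     "tab_close": "tab-close",
--     "tab_select": "tab-select",
--     "state_save": "state-save",
--     "state_load": "state-load",
-- }
--
-- def tool_call_to_cli(name: str, args: dict[str, str]) -> str | None:
--     """Convert a Gemini function call to a playwright-cli command string.
--
--     Returns ``None`` for the ``finish`` tool (not a CLI command).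
--     """
--     if name == "finish":
--         return None
--
--     cli_name = _CLI_NAME_MAP.get(name, name)
--     parts = ["playwright-cli", cli_name]
--
--     # Build argument list based on the specific tool.
--     if name in {"click", "dblclick", "hover", "check", "uncheck"}:
--         parts.append(args["ref"])
--     elif name == "fill":
--         parts.extend([args["ref"], args["value"]])
--     elif name == "type":
--         parts.append(args["text"])
--     elif name == "press":
--         parts.append(args["key"])
--     elif name == "select":
--         parts.extend([args["ref"], args["value"]])
--     elif name == "drag":
--         parts.extend([args["source_ref"], args["target_ref"]])
--     elif name == "upload":
--         parts.extend([args["ref"], args["file_path"]])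
--     elif name == "goto":
--         url = args["url"]
--         if "://" not in url and "." in url:
--             url = "https://" + url
--         parts.append(url)
--     elif name in {"tab_new", "tab_close", "tab_select"}:
--         if name == "tab_new" and args.get("url"):
--             parts.append(args["url"])
--         elif name == "tab_close" and args.get("index"):
--             parts.append(args["index"])
--         elif name == "tab_select":
--             parts.append(args["index"])
--     elif name in {"state_save", "state_load"}:
--         parts.append(args["path"])
--     # snapshot, screenshot, go_back, go_forward, reload, close — no extra args
--
--     return " ".join(shlex.quote(part) for part in parts)
-- ===== SOURCE B (Python) =====
-- import re
--
-- _UNSAFE = re.compile(r"[^\w@%+=:,./-]", re.ASCII)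
--
-- def _quote(s: str) -> str:
--     """shlex.quote, inlined."""
--     if not s:
--         return "''"
--     if _UNSAFE.search(s) is None:
--         return s
--     return "'" + s.replace("'", "'\"'\"'") + "'"
--
-- _CLI_NAME_MAP: dict[str, str] = {
--     "go_back": "go-back",
--     "go_forward": "go-forward",
--     "tab_list": "tab-list",
--     "tab_new": "tab-new",
--     "tab_close": "tab-close",
--     "tab_select": "tab-select",
--     "state_save": "state-save",
--     "state_load": "state-load",
-- }
--
-- # A tiny argument-spec DSL: each tool maps to a list of tokens interpreted by one fold.
-- #   ("req", k)  -> append args[k]                 (KeyError if missing, like A's subscription)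
-- #   ("opt", k)  -> append args.get(k) only if truthy
-- #   ("url", k)  -> append args[k], prefixing "https://" when it has no scheme but has a dot
-- _SPEC: dict[str, list[tuple[str, str]]] = {
--     "click": [("req", "ref")],
--     "dblclick": [("req", "ref")],
--     "hover": [("req", "ref")],
--     "check": [("req", "ref")],
--     "uncheck": [("req", "ref")],
--     "fill": [("req", "ref"), ("req", "value")],
--     "type": [("req", "text")],
--     "press": [("req", "key")],
--     "select": [("req", "ref"), ("req", "value")],
--     "drag": [("req", "source_ref"), ("req", "target_ref")],
--     "upload": [("req", "ref"), ("req", "file_path")],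
--     "goto": [("url", "url")],
--     "tab_new": [("opt", "url")],
--     "tab_close": [("opt", "index")],
--     "tab_select": [("req", "index")],
--     "state_save": [("req", "path")],
--     "state_load": [("req", "path")],
-- }
--
-- def tool_call_to_cli(name: str, args: dict[str, str]) -> str | None:
--     if name == "finish":
--         return None
--     parts = ["playwright-cli", _CLI_NAME_MAP.get(name, name)]
--     for kind, key in _SPEC.get(name, []):
--         if kind == "req":
--             parts.append(args[key])
--         elif kind == "opt":
--             v = args.get(key)
--             if v:
--                 parts.append(v)
--         else:  # "url"
--             url = args[key]
--             if "://" not in url and "." in url: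
--                 url = "https://" + url
--             parts.append(url)
--     return " ".join(map(_quote, parts))
-- ===== Notes on version B (the rewrite author's own statement) =====
-- stated objective: alternative
-- what changed: B replaces A's per-tool elif chain entirely by a tiny declarative spec DSL (required/optional/url-rewrite arg tokens per tool) interpreted by one generic fold, so goto's URL rewrite and the truthiness-gated tab_* logic become interpreted token kinds instead of dedicated branches.
import Mathlib
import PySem

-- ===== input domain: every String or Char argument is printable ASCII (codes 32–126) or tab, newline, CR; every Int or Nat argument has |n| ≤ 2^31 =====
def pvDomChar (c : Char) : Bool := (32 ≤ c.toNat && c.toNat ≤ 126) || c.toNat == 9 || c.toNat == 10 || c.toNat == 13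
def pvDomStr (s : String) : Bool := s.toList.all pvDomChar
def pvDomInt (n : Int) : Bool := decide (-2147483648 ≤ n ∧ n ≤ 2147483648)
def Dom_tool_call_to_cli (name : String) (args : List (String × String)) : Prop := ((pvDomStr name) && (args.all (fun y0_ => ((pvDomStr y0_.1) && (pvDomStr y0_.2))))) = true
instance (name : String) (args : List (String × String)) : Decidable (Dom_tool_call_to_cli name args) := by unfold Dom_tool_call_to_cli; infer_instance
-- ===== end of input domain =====

-- B reformulates A's per-tool elif chain as a small argument-spec DSL (req/opt/url tokens)
-- interpreted by one fold (objective: alternative). Return values only; no mutation.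

-- dict lookup on an association list: first match
def pyLookup? (xs : List (String × String)) (k : String) : Option String :=
  (xs.find? (fun p => p.1 == k)).map (·.2)

-- args.get(k, d) / the total form of args[k] used under Pre_
def pyLookupD (xs : List (String × String)) (k : String) (d : String) : String :=
  (pyLookup? xs k).getD d

-- shlex.quote, exact on the ASCII domain: safe chars are [A-Za-z0-9_@%+=:,./-]
def pyShlexSafeChar (c : Char) : Bool :=
  ('a' ≤ c && c ≤ 'z') || ('A' ≤ c && c ≤ 'Z') || ('0' ≤ c && c ≤ '9') ||
  c == '_' || c == '@' || c == '%' || c == '+' || c == '=' || c == ':' ||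
  c == ',' || c == '.' || c == '/' || c == '-'

def pyShlexQuote (s : String) : String :=
  if s = "" then "''"
  else if s.toList.all pyShlexSafeChar then s
  else "'" ++ PySem.Str.replace s "'" "'\"'\"'" ++ "'"

def pvCliNameMap : List (String × String) :=
  [("go_back", "go-back"), ("go_forward", "go-forward"), ("tab_list", "tab-list"),
   ("tab_new", "tab-new"), ("tab_close", "tab-close"), ("tab_select", "tab-select"),
   ("state_save", "state-save"), ("state_load", "state-load")]

-- ===== PORT A =====
def tool_call_to_cli (name : String) (args : List (String × String)) : Option String :=
  if name = "finish" then none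
  else
    let cli_name := (pyLookup? pvCliNameMap name).getD name
    let parts : List String := ["playwright-cli", cli_name]
    let parts :=
      if name ∈ ["click", "dblclick", "hover", "check", "uncheck"] then
        parts ++ [pyLookupD args "ref" ""]
      else if name = "fill" then
        parts ++ [pyLookupD args "ref" "", pyLookupD args "value" ""]
      else if name = "type" then
        parts ++ [pyLookupD args "text" ""]
      else if name = "press" then
        parts ++ [pyLookupD args "key" ""]
      else if name = "select" then
        parts ++ [pyLookupD args "ref" "", pyLookupD args "value" ""]
      else if name = "drag" then
        parts ++ [pyLookupD args "source_ref" "", pyLookupD args "target_ref" ""]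
      else if name = "upload" then
        parts ++ [pyLookupD args "ref" "", pyLookupD args "file_path" ""]
      else if name = "goto" then
        let url := pyLookupD args "url" ""
        let url := if ¬ PySem.Str.isIn "://" url ∧ PySem.Str.isIn "." url
                   then "https://" ++ url else url
        parts ++ [url]
      else if name ∈ ["tab_new", "tab_close", "tab_select"] then
        if name = "tab_new" ∧ pyLookupD args "url" "" ≠ "" then
          parts ++ [pyLookupD args "url" ""]
        else if name = "tab_close" ∧ pyLookupD args "index" "" ≠ "" then
          parts ++ [pyLookupD args "index" ""]
        else if name = "tab_select" then
          parts ++ [pyLookupD args "index" ""]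
        else parts
      else if name ∈ ["state_save", "state_load"] then
        parts ++ [pyLookupD args "path" ""]
      else parts
    some (PySem.Str.join " " (parts.map pyShlexQuote))

-- ===== PORT B =====
-- the argument-spec DSL: tool name -> list of (kind, key) tokens
def pvSpec : List (String × List (String × String)) :=
  [("click", [("req", "ref")]), ("dblclick", [("req", "ref")]), ("hover", [("req", "ref")]),
   ("check", [("req", "ref")]), ("uncheck", [("req", "ref")]),
   ("fill", [("req", "ref"), ("req", "value")]), ("type", [("req", "text")]),
   ("press", [("req", "key")]), ("select", [("req", "ref"), ("req", "value")]),
   ("drag", [("req", "source_ref"), ("req", "target_ref")]),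
   ("upload", [("req", "ref"), ("req", "file_path")]), ("goto", [("url", "url")]),
   ("tab_new", [("opt", "url")]), ("tab_close", [("opt", "index")]),
   ("tab_select", [("req", "index")]),
   ("state_save", [("req", "path")]), ("state_load", [("req", "path")])]

-- the interpreter: one token's effect on the accumulated parts
def pvApplyTok (args : List (String × String)) (parts : List String)
    (tok : String × String) : List String :=
  if tok.1 = "req" then parts ++ [pyLookupD args tok.2 ""]
  else if tok.1 = "opt" then
    let v := pyLookupD args tok.2 ""
    if v ≠ "" then parts ++ [v] else parts
  else
    let url := pyLookupD args tok.2 ""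
    let url := if ¬ PySem.Str.isIn "://" url ∧ PySem.Str.isIn "." url
               then "https://" ++ url else url
    parts ++ [url]

def tool_call_to_cli_alt (name : String) (args : List (String × String)) : Option String :=
  if name = "finish" then none
  else
    let parts : List String := ["playwright-cli", (pyLookup? pvCliNameMap name).getD name]
    let toks := ((pvSpec.find? (fun p => p.1 == name)).map (·.2)).getD []
    let parts := toks.foldl (pvApplyTok args) parts
    some (PySem.Str.join " " (parts.map pyShlexQuote))

-- ===== PRECONDITION & SPEC =====
def pvHasKey (args : List (String × String)) (k : String) : Bool :=
  (pyLookup? args k).isSome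

-- Pre_ excludes exactly the inputs where A raises KeyError: a required arg key is missing.
def Pre_tool_call_to_cli (name : String) (args : List (String × String)) : Prop :=
  (if name ∈ ["click", "dblclick", "hover", "check", "uncheck"] then pvHasKey args "ref"
   else if name = "fill" ∨ name = "select" then pvHasKey args "ref" && pvHasKey args "value"
   else if name = "type" then pvHasKey args "text"
   else if name = "press" then pvHasKey args "key"
   else if name = "drag" then pvHasKey args "source_ref" && pvHasKey args "target_ref"
   else if name = "upload" then pvHasKey args "ref" && pvHasKey args "file_path"
   else if name = "goto" then pvHasKey args "url"
   else if name = "tab_select" then pvHasKey args "index"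
   else if name = "state_save" ∨ name = "state_load" then pvHasKey args "path"
   else true) = true

instance (name : String) (args : List (String × String)) : Decidable (Pre_tool_call_to_cli name args) := by
  unfold Pre_tool_call_to_cli; infer_instance

def pvWitness_tool_call_to_cli : String × (List (String × String)) :=
  ("fill", [("ref", "e5"), ("value", "hello world")])

def Spec_tool_call_to_cli (name : String) (args : List (String × String)) (out : Option String) : Prop := out = tool_call_to_cli_alt name args
instance (name : String) (args : List (String × String)) (out : Option String) : Decidable (Spec_tool_call_to_cli name args out) := by unfold Spec_tool_call_to_cli; infer_instance

-- ===== CLAIM (what is proved, stated in full; the proofs are below) =====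
def Claim_equal_tool_call_to_cli : Prop := ∀ (name : String) (args : List (String × String)), Dom_tool_call_to_cli name args → Pre_tool_call_to_cli name args → Spec_tool_call_to_cli name args (tool_call_to_cli name args)

-- ===== LEMMAS AND PROOFS =====

-- ===== VERDICT (by name: the statement is the Claim_ definition above) =====
theorem tool_call_to_cli_spec : Claim_equal_tool_call_to_cli := by
  intro name args _ _
  unfold Spec_tool_call_to_cli tool_call_to_cli tool_call_to_cli_alt
  by_cases h0 : name = "finish"
  · simp [h0]
  by_cases h1 : name = "click"
  · simp [h1, pvSpec, pvApplyTok, pvCliNameMap, pyLookup?]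
  by_cases h2 : name = "dblclick"
  · simp [h2, pvSpec, pvApplyTok, pvCliNameMap, pyLookup?]
  by_cases h3 : name = "hover"
  · simp [h3, pvSpec, pvApplyTok, pvCliNameMap, pyLookup?]
  by_cases h4 : name = "check"
  · simp [h4, pvSpec, pvApplyTok, pvCliNameMap, pyLookup?]
  by_cases h5 : name = "uncheck"
  · simp [h5, pvSpec, pvApplyTok, pvCliNameMap, pyLookup?]
  by_cases h6 : name = "fill"
  · simp [h6, pvSpec, pvApplyTok, pvCliNameMap, pyLookup?]
  by_cases h7 : name = "type"
  · simp [h7, pvSpec, pvApplyTok, pvCliNameMap, pyLookup?]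
  by_cases h8 : name = "press"
  · simp [h8, pvSpec, pvApplyTok, pvCliNameMap, pyLookup?]
  by_cases h9 : name = "select"
  · simp [h9, pvSpec, pvApplyTok, pvCliNameMap, pyLookup?]
  by_cases h10 : name = "drag"
  · simp [h10, pvSpec, pvApplyTok, pvCliNameMap, pyLookup?]
  by_cases h11 : name = "upload"
  · simp [h11, pvSpec, pvApplyTok, pvCliNameMap, pyLookup?]
  by_cases h12 : name = "state_save"
  · simp [h12, pvSpec, pvApplyTok, pvCliNameMap, pyLookup?]
  by_cases h13 : name = "state_load"
  · simp [h13, pvSpec, pvApplyTok, pvCliNameMap, pyLookup?]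
  by_cases h14 : name = "goto"
  · simp [h14, pvSpec, pvApplyTok, pvCliNameMap, pyLookup?]
  by_cases h15 : name = "tab_new"
  · by_cases hv : pyLookupD args "url" "" = ""
    · simp [h15, pvSpec, pvApplyTok, pvCliNameMap, pyLookup?, hv]
    · simp [h15, pvSpec, pvApplyTok, pvCliNameMap, pyLookup?, hv]
  by_cases h16 : name = "tab_close"
  · by_cases hv : pyLookupD args "index" "" = ""
    · simp [h16, pvSpec, pvApplyTok, pvCliNameMap, pyLookup?, hv]
    · simp [h16, pvSpec, pvApplyTok, pvCliNameMap, pyLookup?, hv]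
  by_cases h17 : name = "tab_select"
  · simp [h17, pvSpec, pvApplyTok, pvCliNameMap, pyLookup?]
  · simp [pvSpec, pvCliNameMap, pyLookup?, h0, h1, h2, h3, h4, h5, h6, h7, h8, h9,
      h10, h11, h12, h13, h14, h15, h16, h17,
      Ne.symm h1, Ne.symm h2, Ne.symm h3, Ne.symm h4, Ne.symm h5, Ne.symm h6, Ne.symm h7,
      Ne.symm h8, Ne.symm h9, Ne.symm h10, Ne.symm h11, Ne.symm h12, Ne.symm h13,
      Ne.symm h14, Ne.symm h15, Ne.symm h16, Ne.symm h17]
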